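-- pv_equiv track=rewrite | github.com/paulklemstine/factor | lean/demo/Pythagorean/quadruple_forest_demo.py | list_primitive_quads
-- ===== SOURCE A (Python) =====
-- from math import gcd
-- from functools import reduce
--
-- def list_primitive_quads(N):
--     """List all primitive Pythagorean quadruples with d ≤ N, sorted a ≤ b ≤ c."""
--     quads = []
--     for d in range(1, N+1):
--         for c in range(1, d):
--             for b in range(1, c+1):
--                 for a in range(0, b+1):
--                     if a*a + b*b + c*c == d*d:
--                         if reduce(gcd, [a, b, c, d]) == 1:
--                             quads.append((a, b, c, d))
--     return quads
-- ===== SOURCE B (Python) =====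
-- from math import gcd, isqrt
--
-- def _root(s):
--     """Exact integer square root of s, or None if s is negative or not a perfect square."""
--     if s < 0:
--         return None
--     r = isqrt(s)
--     return r if r * r == s else None
--
-- def list_primitive_quads(N):
--     """List all primitive Pythagorean quadruples with d <= N, sorted a <= b <= c."""
--     return [(a, b, c, d)
--             for d in range(1, N + 1)
--             for c in range(1, d)
--             for b in range(1, c + 1)
--             for a in [_root(d*d - c*c - b*b)]
--             if a is not None and a <= b and gcd(gcd(a, b), gcd(c, d)) == 1]
-- ===== Notes on version B (the rewrite author's own statement) =====
-- stated objective: faster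
-- what changed: B drops A's innermost a-loop and its accumulator style altogether: it builds the result as a comprehension (flatMap/filterMap in the port) where for each (b,c,d) the unique candidate a = isqrt(d*d-c*c-b*b) is tested once for being an exact square root at most b, with the gcd computed as gcd(gcd(a,b),gcd(c,d)).
import Mathlib
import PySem

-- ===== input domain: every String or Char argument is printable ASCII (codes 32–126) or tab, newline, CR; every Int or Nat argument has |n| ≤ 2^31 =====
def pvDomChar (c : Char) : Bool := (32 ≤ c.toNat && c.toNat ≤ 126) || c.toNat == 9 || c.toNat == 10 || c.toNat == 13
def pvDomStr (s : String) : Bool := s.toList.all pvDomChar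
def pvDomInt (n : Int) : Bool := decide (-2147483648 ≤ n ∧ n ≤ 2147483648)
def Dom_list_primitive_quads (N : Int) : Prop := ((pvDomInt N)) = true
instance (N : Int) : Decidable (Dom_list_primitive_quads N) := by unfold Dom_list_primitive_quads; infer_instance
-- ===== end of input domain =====

-- B replaces A's accumulator loops and innermost a-scan by a comprehension: flatMap over d and c,
-- filterMap over b testing the single candidate a = isqrt(d*d-c*c-b*b) (O(N^3) instead of O(N^4)).

-- reduce(gcd, [a,b,c,d]) is [b,c,d].foldl pygcd a; math.gcd on ints = gcd of absolute values
def pygcd (x y : Int) : Int := (Int.gcd x y : Int)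

-- ===== PORT A =====
def list_primitive_quads (N : Int) : List (List Int) :=
  (PySem.List.pyRange 1 (N+1) 1).foldl (fun quads d =>
    (PySem.List.pyRange 1 d 1).foldl (fun quads c =>
      (PySem.List.pyRange 1 (c+1) 1).foldl (fun quads b =>
        (PySem.List.pyRange 0 (b+1) 1).foldl (fun quads a =>
          if a*a + b*b + c*c = d*d then
            if [b, c, d].foldl pygcd a = 1 then quads ++ [[a, b, c, d]] else quads
          else quads) quads) quads) quads) []

-- ===== PORT B =====
-- math.isqrt(s) for s ≥ 0 is exactly Nat.sqrt s.toNat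
def root? (s : Int) : Option Int :=
  if s < 0 then none
  else
    let r : Int := Int.ofNat (Nat.sqrt s.toNat)
    if r * r = s then some r else none

def quadAt (d c b : Int) : Option (List Int) :=
  match root? (d*d - c*c - b*b) with
  | none => none
  | some a => if a ≤ b ∧ Nat.gcd (Int.gcd a b) (Int.gcd c d) = 1 then some [a, b, c, d] else none

def list_primitive_quads_alt (N : Int) : List (List Int) :=
  (PySem.List.pyRange 1 (N+1) 1).flatMap (fun d =>
    (PySem.List.pyRange 1 d 1).flatMap (fun c =>
      (PySem.List.pyRange 1 (c+1) 1).filterMap (fun b => quadAt d c b)))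

-- ===== PRECONDITION & SPEC =====
def Spec_list_primitive_quads (N : Int) (out : List (List Int)) : Prop := out = list_primitive_quads_alt N
instance (N : Int) (out : List (List Int)) : Decidable (Spec_list_primitive_quads N out) := by unfold Spec_list_primitive_quads; infer_instance

-- ===== CLAIM (what is proved, stated in full; the proofs are below) =====
def Claim_equal_list_primitive_quads : Prop := ∀ (N : Int), Dom_list_primitive_quads N → Spec_list_primitive_quads N (list_primitive_quads N)

-- ===== LEMMAS AND PROOFS =====

-- a nonnegative exact square root is recovered by Nat.sqrt
lemma sqrt_of_sq {a s : Int} (ha : 0 ≤ a) (h : a * a = s) :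
    Int.ofNat (Nat.sqrt s.toNat) = a := by
  subst h
  rcases Int.eq_ofNat_of_zero_le ha with ⟨n, rfl⟩
  have h1 : ((n : Int) * (n : Int)).toNat = n * n := by
    rw [← Int.natCast_mul, Int.toNat_natCast]
  simp only [Int.ofNat_eq_natCast] at h1 ⊢
  rw [h1, show n * n = n ^ 2 by ring, Nat.sqrt_eq']

-- filtering a Nodup list by a predicate that only a₀ can satisfy
lemma filter_unique {a₀ : Int} {p : Int → Bool} (l : List Int) (hl : l.Nodup)
    (hp : ∀ a ∈ l, p a = true → a = a₀) :
    l.filter p = if a₀ ∈ l ∧ p a₀ = true then [a₀] else [] := by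
  induction l with
  | nil => simp
  | cons x xs ih =>
    have hnd := (List.nodup_cons.mp hl).2
    have hnx := (List.nodup_cons.mp hl).1
    by_cases hx : p x = true
    · have hx0 : x = a₀ := hp x (by simp) hx
      subst hx0
      have hxs : xs.filter p = [] := by
        rw [List.filter_eq_nil_iff]
        intro a ha hpa
        exact hnx (hp a (by simp [ha]) hpa ▸ ha)
      simp [hx, hxs]
    · have hfx : xs.filter p = if a₀ ∈ xs ∧ p a₀ = true then [a₀] else [] :=
        ih hnd (fun a ha hpa => hp a (by simp [ha]) hpa)
      rw [List.filter_cons_of_neg (by simpa using hx), hfx]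
      by_cases hpa : p a₀ = true
      · have hne : a₀ ≠ x := fun h => hx (h ▸ hpa)
        simp [List.mem_cons, hpa, hne]
      · simp [hpa]

-- the gcd chain reduce(gcd,[a,b,c,d]) agrees with B's gcd(gcd(a,b),gcd(c,d))
lemma gcd_chain (a b c d : Int) :
    [b, c, d].foldl pygcd a = (Nat.gcd (Int.gcd a b) (Int.gcd c d) : Int) := by
  simp [List.foldl, pygcd, Int.gcd, Int.natAbs_natCast, Nat.gcd_assoc]

-- the decided form of A's inner test
def pA (d c b a : Int) : Bool :=
  decide (a*a + b*b + c*c = d*d) && decide ([b, c, d].foldl pygcd a = 1)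

-- A's innermost loop over a appends exactly the ≤1 quads B's quadAt produces for this (b,c,d)
lemma inner_eq (d c b : Int) (q : List (List Int)) :
    (PySem.List.pyRange 0 (b+1) 1).foldl (fun quads a =>
        if a*a + b*b + c*c = d*d then
          if [b, c, d].foldl pygcd a = 1 then quads ++ [[a, b, c, d]] else quads
        else quads) q
    = q ++ (quadAt d c b).toList := by
  have hb : (fun (quads : List (List Int)) (a : Int) =>
        if a*a + b*b + c*c = d*d then
          if [b, c, d].foldl pygcd a = 1 then quads ++ [[a, b, c, d]] else quads
        else quads)
      = (fun quads a => if pA d c b a then quads ++ [[a, b, c, d]] else quads) := by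
    funext quads a
    by_cases h1 : a*a + b*b + c*c = d*d <;> by_cases h2 : [b, c, d].foldl pygcd a = 1 <;>
      simp [pA, h1, h2]
  rw [hb, PySem.List.foldl_append_if]
  set s : Int := d*d - c*c - b*b with hs
  set a₀ : Int := Int.ofNat (Nat.sqrt s.toNat) with ha₀
  have ha₀0 : 0 ≤ a₀ := by rw [ha₀]; exact Int.natCast_nonneg _
  have hp : ∀ a ∈ PySem.List.pyRange 0 (b+1) 1, pA d c b a = true → a = a₀ := by
    intro a ha hpa
    have hmem := (PySem.List.mem_pyRange_one).mp ha
    have h1 : a*a + b*b + c*c = d*d := by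
      have := (Bool.and_eq_true _ _).mp hpa
      exact of_decide_eq_true this.1
    have h2 : a*a = s := by rw [hs]; linarith
    exact (sqrt_of_sq hmem.1 h2).symm
  rw [filter_unique (PySem.List.pyRange 0 (b+1) 1) (PySem.List.nodup_pyRange_one 0 (b+1)) hp]
  by_cases hsneg : s < 0
  · have hs' : d*d - c*c - b*b < 0 := by rw [← hs]; exact hsneg
    have hpf : pA d c b a₀ = false := by
      have hne : ¬ (a₀*a₀ + b*b + c*c = d*d) := by
        intro h
        have := mul_self_nonneg a₀
        linarith
      simp [pA, hne]
    have hq : quadAt d c b = none := by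
      unfold quadAt root?
      rw [← hs, if_pos hsneg]
    simp [hpf, hq]
  · have hcond : (a₀ ∈ PySem.List.pyRange 0 (b+1) 1 ∧ pA d c b a₀ = true)
        ↔ (a₀*a₀ = s ∧ a₀ ≤ b ∧ [b, c, d].foldl pygcd a₀ = 1) := by
      rw [PySem.List.mem_pyRange_one]
      constructor
      · rintro ⟨⟨_, hlt⟩, hpa⟩
        rcases (Bool.and_eq_true _ _).mp hpa with ⟨h1, h2⟩
        have h1' := of_decide_eq_true h1
        exact ⟨by rw [hs]; linarith, by omega, of_decide_eq_true h2⟩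
      · rintro ⟨h1, h2, h3⟩
        refine ⟨⟨ha₀0, by omega⟩, ?_⟩
        rw [pA, Bool.and_eq_true, decide_eq_true_iff, decide_eq_true_iff]
        exact ⟨by rw [hs] at h1; linarith, h3⟩
    have hq : quadAt d c b
        = if a₀*a₀ = s ∧ a₀ ≤ b ∧ Nat.gcd (Int.gcd a₀ b) (Int.gcd c d) = 1
          then some [a₀, b, c, d] else none := by
      unfold quadAt root?
      rw [← hs, if_neg hsneg]
      simp only [← ha₀]
      by_cases hr : a₀ * a₀ = s
      · rw [if_pos hr]
        dsimp only
        by_cases hg : a₀ ≤ b ∧ Nat.gcd (Int.gcd a₀ b) (Int.gcd c d) = 1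
        · rw [if_pos hg, if_pos ⟨hr, hg⟩]
        · rw [if_neg hg, if_neg (fun h => hg h.2)]
      · rw [if_neg hr, if_neg (fun h => hr h.1)]
    have hcfold : (a₀*a₀ = s ∧ a₀ ≤ b ∧ [b, c, d].foldl pygcd a₀ = 1)
        ↔ (a₀*a₀ = s ∧ a₀ ≤ b ∧ Nat.gcd (Int.gcd a₀ b) (Int.gcd c d) = 1) := by
      rw [gcd_chain a₀ b c d, Nat.cast_eq_one]
    rw [hq]
    by_cases hc : a₀*a₀ = s ∧ a₀ ≤ b ∧ Nat.gcd (Int.gcd a₀ b) (Int.gcd c d) = 1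
    · rw [if_pos (hcond.mpr (hcfold.mpr hc)), if_pos hc]; simp
    · rw [if_neg (fun h => hc (hcfold.mp (hcond.mp h))), if_neg hc]; simp

-- ===== VERDICT (by name: the statement is the Claim_ definition above) =====
theorem list_primitive_quads_spec : Claim_equal_list_primitive_quads := by
  intro N _
  unfold Spec_list_primitive_quads list_primitive_quads list_primitive_quads_alt
  have hstep : ∀ (l : List Int) (f : Int → List (List Int)) (q : List (List Int)),
      l.foldl (fun acc x => acc ++ f x) q = q ++ l.flatMap f :=
    fun l f q => PySem.List.foldl_append_eq_flatMap f l q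
  calc (PySem.List.pyRange 1 (N+1) 1).foldl (fun quads d =>
        (PySem.List.pyRange 1 d 1).foldl (fun quads c =>
          (PySem.List.pyRange 1 (c+1) 1).foldl (fun quads b =>
            (PySem.List.pyRange 0 (b+1) 1).foldl (fun quads a =>
              if a*a + b*b + c*c = d*d then
                if [b, c, d].foldl pygcd a = 1 then quads ++ [[a, b, c, d]] else quads
              else quads) quads) quads) quads) []
      = (PySem.List.pyRange 1 (N+1) 1).foldl (fun quads d =>
          quads ++ (PySem.List.pyRange 1 d 1).flatMap (fun c =>
            (PySem.List.pyRange 1 (c+1) 1).flatMap (fun b => (quadAt d c b).toList))) [] := by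
        apply PySem.List.foldl_congr_mem
        intro q d _
        calc (PySem.List.pyRange 1 d 1).foldl (fun quads c =>
              (PySem.List.pyRange 1 (c+1) 1).foldl (fun quads b =>
                (PySem.List.pyRange 0 (b+1) 1).foldl (fun quads a =>
                  if a*a + b*b + c*c = d*d then
                    if [b, c, d].foldl pygcd a = 1 then quads ++ [[a, b, c, d]] else quads
                  else quads) quads) quads) q
            = (PySem.List.pyRange 1 d 1).foldl (fun quads c =>
                quads ++ (PySem.List.pyRange 1 (c+1) 1).flatMap (fun b => (quadAt d c b).toList)) q := by
              apply PySem.List.foldl_congr_mem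
              intro q' c _
              calc (PySem.List.pyRange 1 (c+1) 1).foldl (fun quads b =>
                    (PySem.List.pyRange 0 (b+1) 1).foldl (fun quads a =>
                      if a*a + b*b + c*c = d*d then
                        if [b, c, d].foldl pygcd a = 1 then quads ++ [[a, b, c, d]] else quads
                      else quads) quads) q'
                  = (PySem.List.pyRange 1 (c+1) 1).foldl
                      (fun quads b => quads ++ (quadAt d c b).toList) q' := by
                    apply PySem.List.foldl_congr_mem
                    intro q'' b _
                    exact inner_eq d c b q''
                _ = q' ++ (PySem.List.pyRange 1 (c+1) 1).flatMap (fun b => (quadAt d c b).toList) :=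
                    hstep _ _ _
          _ = q ++ (PySem.List.pyRange 1 d 1).flatMap (fun c =>
                (PySem.List.pyRange 1 (c+1) 1).flatMap (fun b => (quadAt d c b).toList)) :=
              hstep _ _ _
    _ = (PySem.List.pyRange 1 (N+1) 1).flatMap (fun d =>
          (PySem.List.pyRange 1 d 1).flatMap (fun c =>
            (PySem.List.pyRange 1 (c+1) 1).flatMap (fun b => (quadAt d c b).toList))) := by
        rw [hstep]; simp
    _ = (PySem.List.pyRange 1 (N+1) 1).flatMap (fun d =>
          (PySem.List.pyRange 1 d 1).flatMap (fun c =>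
            (PySem.List.pyRange 1 (c+1) 1).filterMap (fun b => quadAt d c b))) := by
        congr 1; funext d; congr 1; funext c
        induction PySem.List.pyRange 1 (c+1) 1 with
        | nil => simp
        | cons b bs ih =>
          cases hqb : quadAt d c b <;>
            simp [List.flatMap_cons, hqb, ih]
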